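-- pv_equiv track=rewrite | github.com/riffschelder/train.usaco.org | chapter2/section2.3/zerosum.py | is_zero_sum
-- ===== SOURCE A (Python) =====
-- def is_zero_sum(operations):
--   numbers = []
--   operators = []
--   current_number = 1
--   for i, op in enumerate(operations):
--     if op == ' ':
--       current_number *= 10
--       current_number += i + 2
--     else:
--       numbers.append(current_number)
--       operators.append(op)
--       current_number = i + 2
--   numbers.append(current_number)
--
--   answer = numbers[0]
--   for num, op in zip(numbers[1:], operators):
--     if op == '+':
--       answer += num
--     else:
--       answer -= num
--
--   if answer == 0:
--     return True
--   else:
--     return False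
-- ===== SOURCE B (Python) =====
-- def is_zero_sum(operations):
--   answer = 0
--   sign = 1
--   current_number = 1
--   for i, op in enumerate(operations):
--     if op == ' ':
--       current_number = current_number * 10 + i + 2
--     else:
--       answer += sign * current_number
--       sign = 1 if op == '+' else -1
--       current_number = i + 2
--   answer += sign * current_number
--   return answer == 0
-- ===== Notes on version B (the rewrite author's own statement) =====
-- stated objective: simpler
-- what changed: B fuses A's two passes into one linear scan keeping three scalars (answer, pending sign, current number) instead of building the numbers[] and operators[] lists and re-walking them with zip.
import Mathlib
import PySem

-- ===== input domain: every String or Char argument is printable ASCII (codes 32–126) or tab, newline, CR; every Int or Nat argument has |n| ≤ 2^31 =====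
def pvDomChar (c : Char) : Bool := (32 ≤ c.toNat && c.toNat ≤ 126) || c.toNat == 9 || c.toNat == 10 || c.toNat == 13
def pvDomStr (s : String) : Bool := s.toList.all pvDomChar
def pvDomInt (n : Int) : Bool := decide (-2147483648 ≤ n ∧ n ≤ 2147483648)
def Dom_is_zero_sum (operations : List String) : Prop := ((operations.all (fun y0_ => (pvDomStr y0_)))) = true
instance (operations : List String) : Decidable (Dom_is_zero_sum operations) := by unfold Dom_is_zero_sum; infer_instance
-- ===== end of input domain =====

-- B fuses A's two passes into one scan over three scalars (answer, pending sign, current number),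
-- dropping the intermediate numbers[]/operators[] lists; same values, simpler and O(1) extra space.

-- ===== PORT A =====
-- first loop's step: build numbers/operators lists, multi-digit accumulation on ' '
def pvStepA (st : List Int × List String × Int) (p : Int × String) : List Int × List String × Int :=
  if p.2 = " " then (st.1, st.2.1, st.2.2 * 10 + (p.1 + 2))
  else (st.1 ++ [st.2.2], st.2.1 ++ [p.2], p.1 + 2)

def is_zero_sum (operations : List String) : Bool :=
  let st := (PySem.List.enumerate operations).foldl pvStepA ([], [], 1)
  let numbers := st.1 ++ [st.2.2]
  -- numbers[0]: numbers is nonempty (a value was just appended), so headD is exact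
  let answer := ((numbers.drop 1).zip st.2.1).foldl
      (fun ans q => if q.2 = "+" then ans + q.1 else ans - q.1) (numbers.headD 0)
  if answer = 0 then true else false

-- ===== PORT B =====
-- single-pass step over (answer, sign, current_number)
def pvStepB (st : Int × Int × Int) (p : Int × String) : Int × Int × Int :=
  if p.2 = " " then (st.1, st.2.1, st.2.2 * 10 + p.1 + 2)
  else (st.1 + st.2.1 * st.2.2, if p.2 = "+" then 1 else -1, p.1 + 2)

def is_zero_sum_alt (operations : List String) : Bool :=
  let st := (PySem.List.enumerate operations).foldl pvStepB (0, 1, 1)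
  (st.1 + st.2.1 * st.2.2) == 0

-- ===== PRECONDITION & SPEC =====
def Spec_is_zero_sum (operations : List String) (out : Bool) : Prop := out = is_zero_sum_alt operations
instance (operations : List String) (out : Bool) : Decidable (Spec_is_zero_sum operations out) := by unfold Spec_is_zero_sum; infer_instance

-- ===== CLAIM (what is proved, stated in full; the proofs are below) =====
def Claim_equal_is_zero_sum : Prop := ∀ (operations : List String), Dom_is_zero_sum operations → Spec_is_zero_sum operations (is_zero_sum operations)

-- ===== LEMMAS AND PROOFS =====

-- A's second loop, as a function of the first loop's state (numbers = ns ++ [c])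
def pvEvalA (ns : List Int) (ops : List String) (c : Int) : Int :=
  (((ns ++ [c]).drop 1).zip ops).foldl
    (fun ans q => if q.2 = "+" then ans + q.1 else ans - q.1) ((ns ++ [c]).headD 0)

theorem pvEvalA_append (ns : List Int) (ops : List String) (c : Int) (e : String) (x : Int)
    (h : ns.length = ops.length) :
    pvEvalA (ns ++ [c]) (ops ++ [e]) x
      = if e = "+" then pvEvalA ns ops c + x else pvEvalA ns ops c - x := by
  cases ns with
  | nil =>
    cases ops with
    | nil => simp [pvEvalA]
    | cons o os => simp at h
  | cons n0 rest =>
    have hlen : (rest ++ [c]).length = ops.length := by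
      simp at h ⊢; omega
    simp only [pvEvalA, List.cons_append, List.headD_cons, List.drop_one, List.tail_cons]
    rw [List.zip_append hlen, List.foldl_append]
    simp

theorem pvMain (es : List (Int × String)) :
    ∀ (ns : List Int) (ops : List String) (a s c : Int),
    ns.length = ops.length →
    (∀ x : Int, a + s * x = pvEvalA ns ops x) →
    (let st := es.foldl pvStepB (a, s, c); st.1 + st.2.1 * st.2.2)
      = (let st := es.foldl pvStepA (ns, ops, c); pvEvalA st.1 st.2.1 st.2.2) := by
  induction es with
  | nil => intro ns ops a s c _ hinv; simpa using hinv c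
  | cons e rest ih =>
    intro ns ops a s c hlen hinv
    by_cases hsp : e.2 = " "
    · simp only [List.foldl_cons, pvStepA, pvStepB, hsp, if_true]
      have hc : c * 10 + e.1 + 2 = c * 10 + (e.1 + 2) := by ring
      rw [hc]
      exact ih ns ops a s _ hlen hinv
    · simp only [List.foldl_cons, pvStepA, pvStepB, if_neg hsp]
      apply ih
      · simp [hlen]
      · intro x
        rw [pvEvalA_append ns ops c e.2 x hlen, ← hinv c]
        split_ifs <;> ring

theorem is_zero_sum_eq (operations : List String) :
    is_zero_sum operations = is_zero_sum_alt operations := by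
  unfold is_zero_sum is_zero_sum_alt
  have h := pvMain (PySem.List.enumerate operations) [] [] 0 1 1 rfl
    (by intro x; simp [pvEvalA])
  simp only at h
  dsimp only
  rw [h]
  simp only [pvEvalA]
  generalize (((((PySem.List.enumerate operations).foldl pvStepA ([], [], 1)).1 ++
      [((PySem.List.enumerate operations).foldl pvStepA ([], [], 1)).2.2]).drop 1).zip
      ((PySem.List.enumerate operations).foldl pvStepA ([], [], 1)).2.1).foldl
      (fun ans q => if q.2 = "+" then ans + q.1 else ans - q.1)
      ((((PySem.List.enumerate operations).foldl pvStepA ([], [], 1)).1 ++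
      [((PySem.List.enumerate operations).foldl pvStepA ([], [], 1)).2.2]).headD 0) = z
  by_cases hz : z = 0 <;> simp [hz]

-- ===== VERDICT (by name: the statement is the Claim_ definition above) =====
theorem is_zero_sum_spec : Claim_equal_is_zero_sum := by
  intro operations _
  exact is_zero_sum_eq operations
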